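-- pv_equiv track=rewrite | github.com/slamer59/mcp-seo | src/mcp_seo/tools/content_analyzer.py | _cluster_keywords_automatically
-- ===== SOURCE A (Python) =====
-- from typing import Any, Dict, List, Optional, Set, Tuple
--
-- def _cluster_keywords_automatically(keywords: List[str]) -> Dict[str, List[str]]:
--     """Automatically cluster keywords when no semantic groups are provided."""
--     clusters = {}
--
--     # Simple automatic clustering based on word patterns
--     for keyword in keywords:
--         words = keyword.lower().split()
--
--         # Assign to cluster based on first significant word
--         if any(word in ['setup', 'install', 'configure'] for word in words):
--             clusters.setdefault('setup_process', []).append(keyword)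
--         elif any(word in ['best', 'top', 'comparison'] for word in words):
--             clusters.setdefault('comparison_terms', []).append(keyword)
--         elif any(word in ['how', 'tutorial', 'guide'] for word in words):
--             clusters.setdefault('educational_content', []).append(keyword)
--         elif len(words) >= 2:
--             clusters.setdefault('multi_word_terms', []).append(keyword)
--         else:
--             clusters.setdefault('single_terms', []).append(keyword)
--
--     return {k: v for k, v in clusters.items() if v}
-- ===== SOURCE B (Python) =====
-- _CATEGORIES = (
--     ("setup_process", frozenset({"setup", "install", "configure"})),
--     ("comparison_terms", frozenset({"best", "top", "comparison"})),
--     ("educational_content", frozenset({"how", "tutorial", "guide"})),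
-- )
--
--
-- def _classify(keyword):
--     """Tag one keyword: first matching priority category, else arity-based bucket."""
--     words = keyword.lower().split()
--     for name, vocab in _CATEGORIES:
--         if not vocab.isdisjoint(words):
--             return name
--     return "multi_word_terms" if len(words) >= 2 else "single_terms"
--
--
-- def _cluster_keywords_automatically(keywords):
--     """Automatically cluster keywords when no semantic groups are provided."""
--     tagged = [(_classify(kw), kw) for kw in keywords]
--     order = list(dict.fromkeys(tag for tag, _ in tagged))
--     return {tag: [kw for t, kw in tagged if t == tag] for tag in order}
-- ===== Notes on version B (the rewrite author's own statement) =====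
-- stated objective: alternative
-- what changed: A dispatches each keyword through an if/elif chain that mutates a dict via setdefault(...).append; B is a pure two-phase pipeline: a data-driven classifier (table of priority categories queried with isdisjoint) tags every keyword, then the result is grouped by tag in first-occurrence order with dict.fromkeys and comprehensions. (constant-factor: comprehension-based grouping avoids per-keyword setdefault/append dict mutation)
import Mathlib
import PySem

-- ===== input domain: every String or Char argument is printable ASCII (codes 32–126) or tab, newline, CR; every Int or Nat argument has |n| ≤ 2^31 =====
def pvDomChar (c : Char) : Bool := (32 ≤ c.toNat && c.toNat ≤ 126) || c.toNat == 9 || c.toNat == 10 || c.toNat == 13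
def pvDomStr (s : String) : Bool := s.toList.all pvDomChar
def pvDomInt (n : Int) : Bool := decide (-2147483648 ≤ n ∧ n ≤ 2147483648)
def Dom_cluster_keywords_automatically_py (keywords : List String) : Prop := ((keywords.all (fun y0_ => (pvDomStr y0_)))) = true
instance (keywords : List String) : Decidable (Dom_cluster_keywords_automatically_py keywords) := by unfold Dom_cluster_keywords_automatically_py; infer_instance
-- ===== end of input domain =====

-- B replaces A's dispatch-into-a-mutated-dict loop by a pure two-phase pipeline (tag each
-- keyword via a data-driven category table, then group by tag in first-occurrence order);
-- objective: alternative decomposition, same cost.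

-- ===== PORT A =====
-- body of A's for-loop: the if/elif chain with clusters.setdefault(...).append(keyword)
def pvStepA (clusters : PySem.Dict String (List String)) (keyword : String) : PySem.Dict String (List String) :=
  let words := PySem.Str.split₀ (PySem.Str.lower keyword)
  if words.any (fun word => decide (word ∈ ["setup", "install", "configure"])) then
    clusters.modify "setup_process" [] (· ++ [keyword])
  else if words.any (fun word => decide (word ∈ ["best", "top", "comparison"])) then
    clusters.modify "comparison_terms" [] (· ++ [keyword])
  else if words.any (fun word => decide (word ∈ ["how", "tutorial", "guide"])) then
    clusters.modify "educational_content" [] (· ++ [keyword])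
  else if words.length ≥ 2 then
    clusters.modify "multi_word_terms" [] (· ++ [keyword])
  else
    clusters.modify "single_terms" [] (· ++ [keyword])

def cluster_keywords_automatically_py (keywords : List String) : List (String × List String) :=
  let clusters := keywords.foldl pvStepA PySem.Dict.empty
  -- {k: v for k, v in clusters.items() if v}
  clusters.items.filter (fun kv => decide (kv.2 ≠ []))

-- ===== PORT B =====
def pvCategories : List (String × PySem.Set String) :=
  [("setup_process", PySem.Set.ofList ["setup", "install", "configure"]),
   ("comparison_terms", PySem.Set.ofList ["best", "top", "comparison"]),
   ("educational_content", PySem.Set.ofList ["how", "tutorial", "guide"])]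

-- the for-loop of _classify: first category whose vocabulary is not disjoint from words
def pvPickCat (words : List String) : List (String × PySem.Set String) → Option String
  | [] => none
  | (name, vocab) :: rest =>
      if !(PySem.Set.isdisjoint vocab words) then some name else pvPickCat words rest

def pvClassify (keyword : String) : String :=
  let words := PySem.Str.split₀ (PySem.Str.lower keyword)
  match pvPickCat words pvCategories with
  | some name => name
  | none => if words.length ≥ 2 then "multi_word_terms" else "single_terms"

def cluster_keywords_automatically_py_alt (keywords : List String) : List (String × List String) :=
  let tagged := keywords.map (fun kw => (pvClassify kw, kw))
  let order := PySem.List.dedup (tagged.map (fun p => p.1))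
  order.map (fun tag => (tag, (tagged.filter (fun p => p.1 == tag)).map (fun p => p.2)))

-- ===== PRECONDITION & SPEC =====
def Spec_cluster_keywords_automatically_py (keywords : List String) (out : List (String × List String)) : Prop := out = cluster_keywords_automatically_py_alt keywords
instance (keywords : List String) (out : List (String × List String)) : Decidable (Spec_cluster_keywords_automatically_py keywords out) := by unfold Spec_cluster_keywords_automatically_py; infer_instance

-- ===== CLAIM (what is proved, stated in full; the proofs are below) =====
def Claim_equal_cluster_keywords_automatically_py : Prop := ∀ (keywords : List String), Dom_cluster_keywords_automatically_py keywords → Spec_cluster_keywords_automatically_py keywords (cluster_keywords_automatically_py keywords)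

-- ===== LEMMAS AND PROOFS =====

lemma pvCategories_eq : pvCategories =
    [("setup_process", ["setup", "install", "configure"]),
     ("comparison_terms", ["best", "top", "comparison"]),
     ("educational_content", ["how", "tutorial", "guide"])] := by decide

-- "any(word in vs for word in words)" tests the same thing as "not vs.isdisjoint(words)"
lemma pv_any_mem_comm (words vs : List String) :
    (words.any (fun w => decide (w ∈ vs))) = (vs.any (fun v => words.contains v)) := by
  apply Bool.eq_iff_iff.mpr
  simp only [List.any_eq_true, decide_eq_true_eq, List.contains_iff_mem]
  exact ⟨fun ⟨x, hx, h⟩ => ⟨x, h, hx⟩, fun ⟨x, hx, h⟩ => ⟨x, h, hx⟩⟩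

-- B's table-driven classifier agrees with A's if/elif dispatch
lemma pvClassify_eq (keyword : String) :
    pvClassify keyword =
      (let words := PySem.Str.split₀ (PySem.Str.lower keyword)
       if words.any (fun word => decide (word ∈ ["setup", "install", "configure"])) then "setup_process"
       else if words.any (fun word => decide (word ∈ ["best", "top", "comparison"])) then "comparison_terms"
       else if words.any (fun word => decide (word ∈ ["how", "tutorial", "guide"])) then "educational_content"
       else if words.length ≥ 2 then "multi_word_terms" else "single_terms") := by
  unfold pvClassify
  rw [pvCategories_eq]
  generalize PySem.Str.split₀ (PySem.Str.lower keyword) = words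
  simp only [pvPickCat, PySem.Set.isdisjoint, Bool.not_not, pv_any_mem_comm]
  split_ifs <;> simp_all

-- A's loop body is one Dict.modify at the key B's classifier computes
lemma pvStepA_eq (d : PySem.Dict String (List String)) (kw : String) :
    pvStepA d kw = d.modify (pvClassify kw) [] (· ++ [kw]) := by
  rw [pvClassify_eq]
  unfold pvStepA
  dsimp only
  split_ifs <;> rfl

-- ===== VERDICT (by name: the statement is the Claim_ definition above) =====
theorem cluster_keywords_automatically_py_spec : Claim_equal_cluster_keywords_automatically_py := by
  intro keywords _
  show cluster_keywords_automatically_py keywords = cluster_keywords_automatically_py_alt keywords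
  unfold cluster_keywords_automatically_py cluster_keywords_automatically_py_alt
  dsimp only
  set l := keywords.map (fun kw => (pvClassify kw, kw)) with hl
  have hstep : keywords.foldl pvStepA PySem.Dict.empty
      = l.foldl (fun d p => d.modify p.1 [] (fun v => v ++ [p.2])) PySem.Dict.empty := by
    rw [hl, List.foldl_map]
    apply PySem.List.foldl_congr_mem
    intro acc x _
    exact pvStepA_eq acc x
  rw [hstep]
  set D := l.foldl (fun d p => d.modify p.1 [] (fun v => v ++ [p.2])) PySem.Dict.empty with hD
  have hkeys : D.keys = PySem.Set.ofList (l.map (fun p => p.1)) := by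
    rw [hD, PySem.Dict.keys_foldl_modify_key l (fun p => p.1) [] (fun _ p v => v ++ [p.2])]
    simp [PySem.Set.update, PySem.Set.ofList, PySem.Dict.keys_empty]
  have hnd : D.keys.Nodup := by
    rw [hkeys]; exact PySem.Set.nodup_ofList _
  have hgetD : ∀ t, D.getD t [] = (l.filter (fun p => p.1 == t)).map (fun p => p.2) := by
    intro t
    rw [hD, PySem.Dict.getD_foldl_modify_append]
    simp [PySem.Dict.getD_empty]
  rw [PySem.Dict.items_eq_map_keys D hnd [], hkeys, PySem.List.dedup_eq_ofList]
  have hfun : (fun k => (k, D.getD k []))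
      = (fun tag => (tag, (l.filter (fun p => p.1 == tag)).map (fun p => p.2))) := by
    funext t; rw [hgetD]
  rw [hfun]
  apply List.filter_eq_self.mpr
  intro kv hkv
  obtain ⟨t, ht, rfl⟩ := List.mem_map.mp hkv
  have : t ∈ l.map (fun p => p.1) := (PySem.Set.mem_ofList _ _).mp ht
  obtain ⟨p, hp, rfl⟩ := List.mem_map.mp this
  simp only [decide_eq_true_eq, ne_eq]
  intro hemp
  have hpin : p ∈ l.filter (fun q => q.1 == p.1) := List.mem_filter.mpr ⟨hp, by simp⟩
  rw [List.map_eq_nil_iff.mp hemp] at hpin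
  simp at hpin
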